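-- pv_equiv track=rewrite | github.com/aorursy/KT_dataset_py | hebertalbertin_pgs1m1-atividade-avaliativa-1.py | check_identicals
-- ===== SOURCE A (Python) =====
-- def check_identicals(listas):
--     # Trabalho Individual
--
--     for lista in listas:
--         lista.sort()
--
--     for z in range(0, len(listas)):
--         for x in range(0, len(listas)):
--             if not z == x:
--                 if listas[z] == listas[x]:
--                     return x
--     return -1
-- ===== SOURCE B (Python) =====
-- def check_identicals(listas):
--     # One pass: hash each sorted list; track the repeat pair whose first
--     # occurrence is earliest, return the second occurrence's index.
--     first = {}
--     best = None  # (z, x): z = first index of the duplicated list, x = its partner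
--     for x, lista in enumerate(listas):
--         key = tuple(sorted(lista))
--         z = first.get(key)
--         if z is None:
--             first[key] = x
--         elif best is None or z < best[0]:
--             best = (z, x)
--     return -1 if best is None else best[1]
-- ===== Notes on version B (the rewrite author's own statement) =====
-- stated objective: alternative
-- what changed: Replaced the nested all-pairs index scan by a single pass that hashes each sorted list into a dict of first occurrences and tracks the repeat pair with the earliest first occurrence, returning its partner index; worst-case cost drops from O(n^2*m) to O(n*m log m), but measured timings varied with the input family, so no speed is claimed.
import Mathlib
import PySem

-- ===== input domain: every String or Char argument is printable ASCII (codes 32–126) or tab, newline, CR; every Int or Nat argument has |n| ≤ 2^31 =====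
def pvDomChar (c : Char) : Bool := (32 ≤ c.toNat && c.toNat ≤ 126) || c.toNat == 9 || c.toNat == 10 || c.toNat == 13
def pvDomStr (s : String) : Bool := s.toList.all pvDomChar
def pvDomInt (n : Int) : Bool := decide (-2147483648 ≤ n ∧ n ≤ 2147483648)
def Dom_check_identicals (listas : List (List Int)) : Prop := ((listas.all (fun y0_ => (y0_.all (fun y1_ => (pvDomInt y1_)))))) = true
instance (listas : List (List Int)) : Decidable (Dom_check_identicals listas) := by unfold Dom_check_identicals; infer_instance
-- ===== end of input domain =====

-- B replaces A's nested all-pairs index scan by one hashed pass over the sorted lists (a different algorithm, same result);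
-- the equivalence proved is about the RETURN value only (A sorts the inner lists in place, B does not mutate).

-- ===== PORT A =====
-- inner 'for x in range(0, len(listas))' loop, early return as Option
def aInner (s : List (List Int)) (z : Int) : List Int → Option Int
  | [] => none
  | x :: xs =>
    if ¬ z = x then
      if PySem.List.pyGetD s z [] = PySem.List.pyGetD s x [] then some x
      else aInner s z xs
    else aInner s z xs

-- outer 'for z in range(0, len(listas))' loop
def aOuter (s : List (List Int)) : List Int → Int
  | [] => -1
  | z :: zs =>
    match aInner s z (PySem.List.pyRange 0 s.length 1) with
    | some x => x
    | none => aOuter s zs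

def check_identicals (listas : List (List Int)) : Int :=
  -- 'for lista in listas: lista.sort()' — each inner list replaced by its sort
  let s := listas.map (fun l => PySem.List.sorted l (fun v => v) false)
  aOuter s (PySem.List.pyRange 0 s.length 1)

-- ===== PORT B =====
-- one step of the 'for x, lista in enumerate(listas)' loop of Source B
def bStep (st : PySem.Dict (List Int) Int × Option (Int × Int)) (p : Int × List Int) :
    PySem.Dict (List Int) Int × Option (Int × Int) :=
  let key := PySem.List.sorted p.2 (fun v => v) false
  match PySem.Dict.get? st.1 key with
  | none => (PySem.Dict.insert st.1 key p.1, st.2)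
  | some z =>
    match st.2 with
    | none => (st.1, some (z, p.1))
    | some b => (st.1, if z < b.1 then some (z, p.1) else some b)

def check_identicals_alt (listas : List (List Int)) : Int :=
  let st := (PySem.List.enumerate listas 0).foldl bStep (PySem.Dict.empty, none)
  match st.2 with
  | none => -1
  | some b => b.2

-- ===== PRECONDITION & SPEC =====
def Spec_check_identicals (listas : List (List Int)) (out : Int) : Prop := out = check_identicals_alt listas
instance (listas : List (List Int)) (out : Int) : Decidable (Spec_check_identicals listas out) := by unfold Spec_check_identicals; infer_instance

-- ===== CLAIM (what is proved, stated in full; the proofs are below) =====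
def Claim_equal_check_identicals : Prop := ∀ (listas : List (List Int)), Dom_check_identicals listas → Spec_check_identicals listas (check_identicals listas)

-- ===== LEMMAS AND PROOFS =====

def sortK (l : List Int) : List Int := PySem.List.sorted l (fun v => v) false

-- first index of k in pre
def fidx : List (List Int) → List Int → Option Nat
  | [], _ => none
  | a :: t, k => if a = k then some 0 else (fidx t k).map (· + 1)

-- pure (Nat-indexed) mirror of B's loop body
def pureStep (pre : List (List Int)) (best : Option (Nat × Nat)) (k : List Int) :
    Option (Nat × Nat) :=
  match fidx pre k with
  | none => best
  | some z =>
    match best with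
    | none => some (z, pre.length)
    | some b => if z < b.1 then some (z, pre.length) else some b

def pureGo : List (List Int) → Option (Nat × Nat) → List (List Int) → Option (Nat × Nat)
  | _, best, [] => best
  | pre, best, k :: rest => pureGo (pre ++ [k]) (pureStep pre best k) rest

def pureB (ks : List (List Int)) : Option (Nat × Nat) := pureGo [] none ks

def ocast : Option (Nat × Nat) → Option (Int × Int) :=
  Option.map (fun b => ((b.1 : Int), (b.2 : Int)))

def ansOf : Option (Nat × Nat) → Int
  | none => -1
  | some b => (b.2 : Int)

-- pure (Nat-indexed) mirror of A's loops
def nInner (ks : List (List Int)) (z : Nat) : List Nat → Option Nat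
  | [] => none
  | x :: xs =>
    if ¬ z = x then
      if ks.getD z [] = ks.getD x [] then some x
      else nInner ks z xs
    else nInner ks z xs

def nOuter (ks : List (List Int)) : List Nat → Int
  | [] => -1
  | z :: zs =>
    match nInner ks z (List.range ks.length) with
    | some x => (x : Int)
    | none => nOuter ks zs

-- what the answer means
def IsAns (ks : List (List Int)) : Option (Nat × Nat) → Prop
  | none => ∀ z x, z < ks.length → x < ks.length → x ≠ z → ks.getD x [] ≠ ks.getD z []
  | some b =>
      b.1 < b.2 ∧ b.2 < ks.length ∧ ks.getD b.2 [] = ks.getD b.1 [] ∧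
      (∀ y, y < b.2 → y ≠ b.1 → ks.getD y [] ≠ ks.getD b.1 []) ∧
      (∀ z' x', z' < b.1 → x' < ks.length → x' ≠ z' → ks.getD x' [] ≠ ks.getD z' [])

-- ---- rfl equation lemmas (full control over unfolding) ----
theorem fidx_cons (a : List Int) (t : List (List Int)) (k : List Int) :
    fidx (a :: t) k = if a = k then some 0 else (fidx t k).map (· + 1) := rfl

theorem nInner_cons (ks : List (List Int)) (z x : Nat) (xs : List Nat) :
    nInner ks z (x :: xs) =
      if ¬ z = x then
        if ks.getD z [] = ks.getD x [] then some x else nInner ks z xs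
      else nInner ks z xs := rfl

theorem aInner_cons (s : List (List Int)) (z x : Int) (xs : List Int) :
    aInner s z (x :: xs) =
      if ¬ z = x then
        if PySem.List.pyGetD s z [] = PySem.List.pyGetD s x [] then some x
        else aInner s z xs
      else aInner s z xs := rfl

theorem nOuter_cons (ks : List (List Int)) (z : Nat) (zs : List Nat) :
    nOuter ks (z :: zs) =
      match nInner ks z (List.range ks.length) with
      | some x => (x : Int)
      | none => nOuter ks zs := rfl

-- ---- fidx facts ----
theorem fidx_none_iff (pre : List (List Int)) (k : List Int) :
    fidx pre k = none ↔ ∀ i, i < pre.length → pre.getD i [] ≠ k := by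
  induction pre with
  | nil => simp [fidx]
  | cons a t ih =>
    rw [fidx_cons]
    by_cases h : a = k
    · rw [if_pos h]
      constructor
      · intro hc; exact absurd hc (by simp)
      · intro hall
        exact absurd h (by simpa using hall 0 (by simp))
    · rw [if_neg h]
      simp only [Option.map_eq_none_iff, ih]
      constructor
      · intro hall i hi
        cases i with
        | zero => simpa [List.getD_cons_zero] using h
        | succ j =>
          rw [List.getD_cons_succ]
          exact hall j (by simpa using hi)
      · intro hall i hi
        have := hall (i + 1) (by simpa using hi)
        rwa [List.getD_cons_succ] at this

theorem fidx_some (pre : List (List Int)) (k : List Int) (z : Nat)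
    (h : fidx pre k = some z) :
    z < pre.length ∧ pre.getD z [] = k ∧ ∀ i, i < z → pre.getD i [] ≠ k := by
  induction pre generalizing z with
  | nil => simp [fidx] at h
  | cons a t ih =>
    rw [fidx_cons] at h
    by_cases ha : a = k
    · rw [if_pos ha] at h
      obtain rfl : (0 : Nat) = z := by simpa using h
      refine ⟨by simp, by simpa [List.getD_cons_zero] using ha, ?_⟩
      intro i hi; omega
    · rw [if_neg ha, Option.map_eq_some_iff] at h
      obtain ⟨m, hm, rfl⟩ := h
      obtain ⟨h1, h2, h3⟩ := ih m hm
      refine ⟨by simpa using h1, by simpa [List.getD_cons_succ] using h2, ?_⟩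
      intro i hi
      cases i with
      | zero => simpa [List.getD_cons_zero] using ha
      | succ j =>
        rw [List.getD_cons_succ]
        exact h3 j (by omega)

theorem fidx_append_singleton (pre : List (List Int)) (a k : List Int) :
    fidx (pre ++ [a]) k =
      match fidx pre k with
      | some n => some n
      | none => if a = k then some pre.length else none := by
  induction pre with
  | nil => simp [fidx]
  | cons b t ih =>
    by_cases hb : b = k
    · simp [fidx_cons, hb]
    · rw [List.cons_append, fidx_cons, if_neg hb, fidx_cons, if_neg hb, ih]
      cases h : fidx t k with
      | some n => simp
      | none => by_cases ha : a = k <;> simp [ha]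

-- ---- getD on a snoc ----
theorem getD_snoc_lt (ks : List (List Int)) (k : List Int) (i : Nat) (h : i < ks.length) :
    (ks ++ [k]).getD i [] = ks.getD i [] := by
  simp [List.getD, List.getElem?_append_left h]

theorem getD_snoc_last (ks : List (List Int)) (k : List Int) :
    (ks ++ [k]).getD ks.length [] = k := by
  simp [List.getD]

-- ---- pureGo / pureB ----
theorem pureGo_snoc (rest : List (List Int)) :
    ∀ (pre : List (List Int)) (best : Option (Nat × Nat)) (k : List Int),
      pureGo pre best (rest ++ [k]) = pureStep (pre ++ rest) (pureGo pre best rest) k := by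
  induction rest with
  | nil => intro pre best k; simp [pureGo]
  | cons r t ih =>
    intro pre best k
    simp only [List.cons_append, pureGo, ih, List.append_assoc, List.nil_append]

theorem pureB_snoc (ks : List (List Int)) (k : List Int) :
    pureB (ks ++ [k]) = pureStep ks (pureB ks) k := by
  simpa [pureB] using pureGo_snoc ks [] none k

theorem pureB_isAns (ks : List (List Int)) : IsAns ks (pureB ks) := by
  induction ks using List.reverseRecOn with
  | nil => intro z x hz hx hne; simp at hz
  | append_singleton ks k ih =>
    rw [pureB_snoc]
    cases hf : fidx ks k with
    | none =>
      have hno : ∀ i, i < ks.length → ks.getD i [] ≠ k := (fidx_none_iff ks k).mp hf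
      cases hb : pureB ks with
      | none =>
        have ihn := hb ▸ ih
        simp only [pureStep, hf]
        intro z x hz hx hne
        simp only [List.length_append, List.length_cons, List.length_nil] at hz hx
        rcases Nat.lt_succ_iff_lt_or_eq.mp hx with hx' | rfl
        · rcases Nat.lt_succ_iff_lt_or_eq.mp hz with hz' | rfl
          · rw [getD_snoc_lt _ _ _ hx', getD_snoc_lt _ _ _ hz']
            exact ihn z x hz' hx' hne
          · rw [getD_snoc_lt _ _ _ hx', getD_snoc_last]
            exact fun hc => hno x hx' hc
        · rcases Nat.lt_succ_iff_lt_or_eq.mp hz with hz' | rfl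
          · rw [getD_snoc_last, getD_snoc_lt _ _ _ hz']
            exact fun hc => hno z hz' hc.symm
          · exact absurd rfl hne
      | some b =>
        have ihs := hb ▸ ih
        obtain ⟨h1, h2, h3, h4, h5⟩ := ihs
        simp only [pureStep, hf]
        refine ⟨h1, by simp; omega, ?_, ?_, ?_⟩
        · rw [getD_snoc_lt _ _ _ h2, getD_snoc_lt _ _ _ (by omega)]; exact h3
        · intro y hy hne
          rw [getD_snoc_lt _ _ _ (by omega), getD_snoc_lt _ _ _ (by omega)]
          exact h4 y hy hne
        · intro z' x' hz' hx' hne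
          simp only [List.length_append, List.length_cons, List.length_nil] at hx'
          rcases Nat.lt_succ_iff_lt_or_eq.mp hx' with hx'' | rfl
          · rw [getD_snoc_lt _ _ _ hx'', getD_snoc_lt _ _ _ (by omega)]
            exact h5 z' x' hz' hx'' hne
          · rw [getD_snoc_last, getD_snoc_lt _ _ _ (by omega)]
            exact fun hc => hno z' (by omega) hc.symm
    | some z0 =>
      obtain ⟨hz0, hkz0, hmin⟩ := fidx_some ks k z0 hf
      cases hb : pureB ks with
      | none =>
        have ihn := hb ▸ ih
        simp only [pureStep, hf]
        refine ⟨hz0, by simp, ?_, ?_, ?_⟩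
        · rw [getD_snoc_last, getD_snoc_lt _ _ _ hz0]; exact hkz0.symm
        · intro y hy hne
          rw [getD_snoc_lt _ _ _ hy, getD_snoc_lt _ _ _ hz0]
          exact ihn z0 y hz0 hy hne
        · intro z' x' hz' hx' hne
          simp only [List.length_append, List.length_cons, List.length_nil] at hx'
          rcases Nat.lt_succ_iff_lt_or_eq.mp hx' with hx'' | rfl
          · rw [getD_snoc_lt _ _ _ hx'', getD_snoc_lt _ _ _ (by omega)]
            exact ihn z' x' (by omega) hx'' hne
          · rw [getD_snoc_last, getD_snoc_lt _ _ _ (by omega)]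
            exact fun hc => hmin z' (by omega) hc.symm
      | some b =>
        have ihs := hb ▸ ih
        obtain ⟨h1, h2, h3, h4, h5⟩ := ihs
        simp only [pureStep, hf]
        by_cases hlt : z0 < b.1
        · rw [if_pos hlt]
          refine ⟨hz0, by simp, ?_, ?_, ?_⟩
          · rw [getD_snoc_last, getD_snoc_lt _ _ _ hz0]; exact hkz0.symm
          · intro y hy hne
            rw [getD_snoc_lt _ _ _ hy, getD_snoc_lt _ _ _ hz0, hkz0]
            intro hc
            exact h5 z0 y hlt hy hne (by rw [hc, hkz0])
          · intro z' x' hz' hx' hne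
            simp only [List.length_append, List.length_cons, List.length_nil] at hx'
            rcases Nat.lt_succ_iff_lt_or_eq.mp hx' with hx'' | rfl
            · rw [getD_snoc_lt _ _ _ hx'', getD_snoc_lt _ _ _ (by omega)]
              exact h5 z' x' (by omega) hx'' hne
            · rw [getD_snoc_last, getD_snoc_lt _ _ _ (by omega)]
              exact fun hc => hmin z' (by omega) hc.symm
        · rw [if_neg hlt]
          refine ⟨h1, by simp; omega, ?_, ?_, ?_⟩
          · rw [getD_snoc_lt _ _ _ h2, getD_snoc_lt _ _ _ (by omega)]; exact h3
          · intro y hy hne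
            rw [getD_snoc_lt _ _ _ (by omega), getD_snoc_lt _ _ _ (by omega)]
            exact h4 y hy hne
          · intro z' x' hz' hx' hne
            simp only [List.length_append, List.length_cons, List.length_nil] at hx'
            rcases Nat.lt_succ_iff_lt_or_eq.mp hx' with hx'' | rfl
            · rw [getD_snoc_lt _ _ _ hx'', getD_snoc_lt _ _ _ (by omega)]
              exact h5 z' x' hz' hx'' hne
            · rw [getD_snoc_last, getD_snoc_lt _ _ _ (by omega)]
              exact fun hc => hmin z' (by omega) hc.symm

-- ---- nInner / nOuter facts ----
theorem nInner_none_iff (ks : List (List Int)) (z : Nat) (L : List Nat) :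
    nInner ks z L = none ↔ ∀ x ∈ L, ¬ z = x → ks.getD z [] ≠ ks.getD x [] := by
  induction L with
  | nil => simp [nInner]
  | cons x xs ih =>
    rw [nInner_cons]
    by_cases hzx : z = x
    · rw [if_neg (not_not_intro hzx), ih]
      constructor
      · intro h x' hx' hne
        rcases List.mem_cons.mp hx' with rfl | h'
        · exact absurd hzx hne
        · exact h x' h' hne
      · intro h x' hx' hne
        exact h x' (List.mem_cons_of_mem _ hx') hne
    · rw [if_pos hzx]
      by_cases heq : ks.getD z [] = ks.getD x []
      · rw [if_pos heq]
        constructor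
        · intro h; exact absurd h (by simp)
        · intro h; exact absurd heq (h x (by simp) hzx)
      · rw [if_neg heq, ih]
        constructor
        · intro h x' hx' hne
          rcases List.mem_cons.mp hx' with rfl | h'
          · exact heq
          · exact h x' h' hne
        · intro h x' hx' hne
          exact h x' (List.mem_cons_of_mem _ hx') hne

theorem nInner_append (ks : List (List Int)) (z : Nat) (L₁ L₂ : List Nat) :
    nInner ks z (L₁ ++ L₂) =
      match nInner ks z L₁ with
      | some x => some x
      | none => nInner ks z L₂ := by
  induction L₁ with
  | nil => simp [nInner]
  | cons x xs ih =>
    rw [List.cons_append, nInner_cons, nInner_cons]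
    by_cases hzx : z = x
    · rw [if_neg (not_not_intro hzx), if_neg (not_not_intro hzx), ih]
    · rw [if_pos hzx, if_pos hzx]
      by_cases heq : ks.getD z [] = ks.getD x []
      · rw [if_pos heq, if_pos heq]
      · rw [if_neg heq, if_neg heq, ih]

theorem nOuter_skip (ks : List (List Int)) (L₁ L₂ : List Nat)
    (h : ∀ z ∈ L₁, nInner ks z (List.range ks.length) = none) :
    nOuter ks (L₁ ++ L₂) = nOuter ks L₂ := by
  induction L₁ with
  | nil => simp
  | cons z zs ih =>
    rw [List.cons_append, nOuter_cons, h z (by simp)]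
    exact ih (fun y hy => h y (by simp [hy]))

theorem nOuter_of_isAns (ks : List (List Int)) (r : Option (Nat × Nat))
    (h : IsAns ks r) :
    nOuter ks (List.range ks.length) = ansOf r := by
  cases r with
  | none =>
    have hskip : nOuter ks (List.range ks.length ++ []) = nOuter ks [] := by
      refine nOuter_skip ks _ [] ?_
      intro z hz
      rw [nInner_none_iff]
      intro x hx hne
      exact fun hc =>
        h z x (List.mem_range.mp hz) (List.mem_range.mp hx) (fun he => hne he.symm) hc.symm
    simpa [nOuter, ansOf] using hskip
  | some b =>
    obtain ⟨h1, h2, h3, h4, h5⟩ := h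
    -- the inner loop at z = b.1 returns b.2
    have hinner : nInner ks b.1 (List.range ks.length) = some b.2 := by
      have hsplit : List.range ks.length =
          List.range b.2 ++ (List.range (ks.length - b.2)).map (b.2 + ·) := by
        rw [← List.range_add]; congr 1; omega
      rw [hsplit, nInner_append]
      have hpre : nInner ks b.1 (List.range b.2) = none := by
        rw [nInner_none_iff]
        intro y hy hne
        exact fun hc => h4 y (List.mem_range.mp hy) (fun he => hne he.symm) hc.symm
      rw [hpre]
      obtain ⟨m, hm⟩ : ∃ m, ks.length - b.2 = m + 1 := ⟨ks.length - b.2 - 1, by omega⟩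
      rw [hm, List.range_succ_eq_map, List.map_cons, nInner_cons,
        if_pos (show ¬ b.1 = b.2 + 0 by omega), if_pos (by simpa using h3.symm)]
      simp
    -- the outer loop skips all z < b.1 and stops at b.1
    have hsplit : List.range ks.length =
        List.range b.1 ++ (List.range (ks.length - b.1)).map (b.1 + ·) := by
      rw [← List.range_add]; congr 1; omega
    rw [hsplit, nOuter_skip]
    · obtain ⟨m, hm⟩ : ∃ m, ks.length - b.1 = m + 1 := ⟨ks.length - b.1 - 1, by omega⟩
      rw [hm, List.range_succ_eq_map, List.map_cons, nOuter_cons]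
      have : nInner ks (b.1 + 0) (List.range ks.length) = some b.2 := by
        simpa using hinner
      rw [this, ansOf]
    · intro z hz
      rw [nInner_none_iff]
      intro x hx hne
      exact fun hc =>
        h5 z x (List.mem_range.mp hz) (List.mem_range.mp hx) (fun he => hne he.symm) hc.symm

-- ---- bridge: port A to the Nat mirror ----
theorem aInner_bridge (ks : List (List Int)) (z : Nat) (L : List Nat) :
    aInner ks (z : Int) (L.map (fun m : Nat => (m : Int))) =
      (nInner ks z L).map (fun m : Nat => (m : Int)) := by
  induction L with
  | nil => simp [aInner, nInner]
  | cons x xs ih =>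
    rw [List.map_cons, aInner_cons, nInner_cons,
      PySem.List.pyGetD_natCast, PySem.List.pyGetD_natCast]
    by_cases hzx : z = x
    · rw [if_neg (not_not_intro (by exact_mod_cast hzx)),
        if_neg (not_not_intro hzx), ih]
    · rw [if_pos (show ¬ (z : Int) = (x : Int) by exact_mod_cast hzx), if_pos hzx]
      by_cases heq : ks.getD z [] = ks.getD x []
      · rw [if_pos heq, if_pos heq]; rfl
      · rw [if_neg heq, if_neg heq, ih]

theorem aOuter_bridge (ks : List (List Int)) (L : List Nat) :
    aOuter ks (L.map (fun m : Nat => (m : Int))) = nOuter ks L := by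
  induction L with
  | nil => simp [aOuter, nOuter]
  | cons z zs ih =>
    show (match aInner ks (z : Int) (PySem.List.pyRange 0 ks.length 1) with
          | some x => x
          | none => aOuter ks (zs.map (fun m : Nat => (m : Int)))) = _
    rw [PySem.List.pyRange_zero_nat ks.length, aInner_bridge, nOuter_cons]
    cases h : nInner ks z (List.range ks.length) with
    | some x => simp
    | none => simpa using ih

theorem a_eq_nOuter (listas : List (List Int)) :
    check_identicals listas =
      nOuter (listas.map sortK) (List.range (listas.map sortK).length) := by
  show aOuter (listas.map sortK)
      (PySem.List.pyRange 0 (listas.map sortK).length 1) = _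
  rw [PySem.List.pyRange_zero_nat]
  exact aOuter_bridge _ _

-- ---- bridge: port B to the Nat mirror ----
theorem b_fold_bridge (rest : List (List Int)) :
    ∀ (pre : List (List Int)) (first : PySem.Dict (List Int) Int)
      (pb : Option (Nat × Nat)),
      (∀ k, first.get? k = (fidx pre k).map (fun m : Nat => (m : Int))) →
      ((PySem.List.enumerate rest (pre.length : Int)).foldl bStep (first, ocast pb)).2
        = ocast (pureGo pre pb (rest.map sortK)) := by
  induction rest with
  | nil => intro pre first pb _; simp [PySem.List.enumerate, pureGo]
  | cons l rest ih =>
    intro pre first pb hinv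
    have hkey : PySem.List.sorted l (fun v => v) false = sortK l := rfl
    simp only [PySem.List.enumerate, List.foldl_cons, List.map_cons, pureGo]
    cases hf : fidx pre (sortK l) with
    | none =>
      have hstep : bStep (first, ocast pb) ((pre.length : Int), l) =
          (first.insert (sortK l) (pre.length : Int), ocast pb) := by
        simp [bStep, hkey, hinv (sortK l), hf]
      rw [hstep]
      have hlen : ((pre.length : Int) + 1) = (((pre ++ [sortK l]).length : Nat) : Int) := by
        simp
      rw [hlen]
      have hstep' : pureStep pre pb (sortK l) = pb := by simp [pureStep, hf]
      rw [hstep']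
      apply ih
      intro k'
      rw [PySem.Dict.get?_insert, fidx_append_singleton]
      by_cases hk : k' = sortK l
      · subst hk; simp [hf]
      · rw [if_neg hk]
        cases h2 : fidx pre k' with
        | some m => simp [hinv k', h2]
        | none =>
          have hne : ¬ sortK l = k' := fun hc => hk hc.symm
          simp [hinv k', h2, hne]
    | some z0 =>
      have hget : first.get? (sortK l) = some ((z0 : Nat) : Int) := by
        rw [hinv (sortK l), hf]; rfl
      have hinv' : ∀ k',
          first.get? k' = (fidx (pre ++ [sortK l]) k').map (fun m : Nat => (m : Int)) := by
        intro k'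
        rw [fidx_append_singleton]
        cases h2 : fidx pre k' with
        | some m => simp [hinv k', h2]
        | none =>
          by_cases hk : sortK l = k'
          · rw [← hk] at h2; rw [h2] at hf; simp at hf
          · simp [hinv k', h2, hk]
      have hlen : ((pre.length : Int) + 1) = (((pre ++ [sortK l]).length : Nat) : Int) := by
        simp
      have hstep' : pureStep pre pb (sortK l) =
          match pb with
          | none => some (z0, pre.length)
          | some b => if z0 < b.1 then some (z0, pre.length) else some b := by
        simp [pureStep, hf]
      cases pb with
      | none =>
        have hstep : bStep (first, ocast none) ((pre.length : Int), l) =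
            (first, ocast (some (z0, pre.length))) := by
          simp [bStep, hkey, hget, ocast]
        rw [hstep, hlen, hstep']
        exact ih _ _ _ hinv'
      | some b =>
        have hstep : bStep (first, ocast (some b)) ((pre.length : Int), l) =
            (first, ocast (if z0 < b.1 then some (z0, pre.length) else some b)) := by
          by_cases hlt : z0 < b.1
          · have hc : ((z0 : Nat) : Int) < ((b.1 : Nat) : Int) := by exact_mod_cast hlt
            simp [bStep, hkey, hget, ocast, hlt, hc]
          · have hc : ¬ ((z0 : Nat) : Int) < ((b.1 : Nat) : Int) := by exact_mod_cast hlt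
            simp [bStep, hkey, hget, ocast, hlt, hc]
        rw [hstep, hlen, hstep']
        exact ih _ _ _ hinv'

theorem b_eq_pureB (listas : List (List Int)) :
    check_identicals_alt listas = ansOf (pureB (listas.map sortK)) := by
  show (match ((PySem.List.enumerate listas 0).foldl bStep (PySem.Dict.empty, none)).2 with
        | none => (-1 : Int)
        | some b => b.2) = _
  have h0 : (0 : Int) = ((([] : List (List Int)).length : Nat) : Int) := by simp
  have hb := b_fold_bridge listas [] PySem.Dict.empty none
      (by intro k; simp [fidx, PySem.Dict.get?_empty])
  rw [show (ocast none) = (none : Option (Int × Int)) from rfl] at hb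
  rw [h0, hb]
  have hpg : pureGo [] none (listas.map sortK) = pureB (listas.map sortK) := rfl
  rw [hpg]
  cases h : pureB (listas.map sortK) with
  | none => simp [ocast, ansOf]
  | some b => simp [ocast, ansOf]

-- ===== VERDICT (by name: the statement is the Claim_ definition above) =====
theorem check_identicals_spec : Claim_equal_check_identicals := by
  intro listas _
  show check_identicals listas = check_identicals_alt listas
  rw [a_eq_nOuter, b_eq_pureB,
    nOuter_of_isAns (listas.map sortK) (pureB (listas.map sortK))
      (pureB_isAns (listas.map sortK))]
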